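-- pv_equiv track=rewrite | github.com/AdamOtto/Daily-Challenges | Challenge669.py | Solution
-- ===== SOURCE A (Python) =====
-- def Solution(ar):
--     if boardBalance(ar) == 0:
--         return False
--
--     for i in range(len(ar)):
--         temp = []
--         temp.extend(ar)
--         for j in range(0, ar[i] + 1):
--             temp[i] = j
--             if boardBalance(temp) == 0:
--                 return True
--     return False
--
-- def boardBalance(ar):
--     xOr = 0
--     for num in ar:
--         xOr ^= num
--     return xOr
-- ===== SOURCE B (Python) =====
-- def Solution(ar):
--     x = 0
--     for v in ar:
--         x ^= v
--     if x == 0: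
--         return False
--     return any(0 <= x ^ v <= v for v in ar)
-- ===== Notes on version B (the rewrite author's own statement) =====
-- stated objective: faster
-- what changed: Replaces the nested scan that re-XORs the whole board for every pile and every candidate value (O(n^2 * maxVal)) with one XOR pass and the closed-form test that pile v works iff 0 <= X^v <= v.
import Mathlib
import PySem

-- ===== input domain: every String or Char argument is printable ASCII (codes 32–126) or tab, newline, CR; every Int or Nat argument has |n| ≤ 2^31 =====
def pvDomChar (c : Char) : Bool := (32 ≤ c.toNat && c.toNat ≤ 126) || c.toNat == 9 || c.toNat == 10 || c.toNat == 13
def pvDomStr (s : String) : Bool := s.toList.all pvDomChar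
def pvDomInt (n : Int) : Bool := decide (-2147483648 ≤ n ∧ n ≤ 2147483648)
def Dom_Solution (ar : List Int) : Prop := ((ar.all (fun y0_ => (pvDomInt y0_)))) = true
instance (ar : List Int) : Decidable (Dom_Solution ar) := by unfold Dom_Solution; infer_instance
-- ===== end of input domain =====

-- B replaces A's nested scan (try every value for every pile, re-XOR the board each time)
-- with one XOR pass and the closed-form test 0 <= X^v <= v; objective: faster (asymptotic).

-- ===== PORT A =====
def boardBalance (ar : List Int) : Int :=
  ar.foldl (fun xOr num => PySem.Int.bxor xOr num) 0

def Solution (ar : List Int) : Bool :=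
  if boardBalance ar == 0 then false
  else
    (PySem.List.pyRange 0 ar.length 1).any (fun i =>
      let temp := ar
      (PySem.List.pyRange 0 (PySem.List.pyGetD ar i 0 + 1) 1).any (fun j =>
        boardBalance (PySem.List.pySetD temp i j) == 0))

-- ===== PORT B =====
def Solution_alt (ar : List Int) : Bool :=
  let x := ar.foldl (fun x v => PySem.Int.bxor x v) 0
  if x == 0 then false
  else ar.any (fun v => decide (0 ≤ PySem.Int.bxor x v) && decide (PySem.Int.bxor x v ≤ v))

-- ===== PRECONDITION & SPEC =====
def Spec_Solution (ar : List Int) (out : Bool) : Prop := out = Solution_alt ar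
instance (ar : List Int) (out : Bool) : Decidable (Spec_Solution ar out) := by unfold Spec_Solution; infer_instance

-- ===== CLAIM (what is proved, stated in full; the proofs are below) =====
def Claim_equal_Solution : Prop := ∀ (ar : List Int), Dom_Solution ar → Spec_Solution ar (Solution ar)

-- ===== LEMMAS AND PROOFS =====

theorem pvBxor_natCast_negSucc (m n : Nat) :
    PySem.Int.bxor (m : Int) (Int.negSucc n) = Int.negSucc (m ^^^ n) := by
  simp [PySem.Int.bxor, Int.negSucc_eq]
  omega

theorem pvBxor_negSucc_natCast (m n : Nat) :
    PySem.Int.bxor (Int.negSucc m) (n : Int) = Int.negSucc (m ^^^ n) := by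
  simp [PySem.Int.bxor, Int.negSucc_eq]
  omega

theorem pvBxor_negSucc_negSucc (m n : Nat) :
    PySem.Int.bxor (Int.negSucc m) (Int.negSucc n) = ((m ^^^ n : Nat) : Int) := by
  simp [PySem.Int.bxor, Int.negSucc_eq]
  omega

theorem pvBxor_assoc (a b c : Int) :
    PySem.Int.bxor (PySem.Int.bxor a b) c = PySem.Int.bxor a (PySem.Int.bxor b c) := by
  rcases a with m | m <;> rcases b with n | n <;> rcases c with k | k <;>
    simp [PySem.Int.bxor_natCast, pvBxor_natCast_negSucc, pvBxor_negSucc_natCast,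
      pvBxor_negSucc_negSucc, Nat.xor_assoc]

theorem pvBxor_zero_left (a : Int) : PySem.Int.bxor 0 a = a := by
  rw [PySem.Int.bxor_comm]; exact PySem.Int.bxor_zero a

theorem pvBxor_eq_zero_iff (a b : Int) : PySem.Int.bxor a b = 0 ↔ a = b := by
  rcases a with m | m <;> rcases b with n | n <;>
    simp [PySem.Int.bxor_natCast, pvBxor_natCast_negSucc, pvBxor_negSucc_natCast,
      pvBxor_negSucc_negSucc, Nat.xor_eq_zero_iff]

theorem pvBal_hoist (xs : List Int) (c : Int) :
    xs.foldl (fun x v => PySem.Int.bxor x v) c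
      = PySem.Int.bxor c (xs.foldl (fun x v => PySem.Int.bxor x v) 0) := by
  induction xs generalizing c with
  | nil => simp [PySem.Int.bxor_zero]
  | cons a t ih =>
    simp only [List.foldl_cons]
    rw [ih (PySem.Int.bxor c a), ih (PySem.Int.bxor 0 a), pvBxor_zero_left, pvBxor_assoc]

theorem pvBal_cons (a : Int) (t : List Int) :
    boardBalance (a :: t) = PySem.Int.bxor a (boardBalance t) := by
  simp only [boardBalance, List.foldl_cons, pvBxor_zero_left]
  exact pvBal_hoist t a

theorem pvBal_set (ar : List Int) (n : Nat) (j : Int) (h : n < ar.length) :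
    boardBalance (ar.set n j)
      = PySem.Int.bxor (PySem.Int.bxor (boardBalance ar) ar[n]) j := by
  induction ar generalizing n with
  | nil => simp at h
  | cons a t ih =>
    cases n with
    | zero =>
      rw [List.set_cons_zero, pvBal_cons, List.getElem_cons_zero, pvBal_cons]
      have hself : PySem.Int.bxor (PySem.Int.bxor a (boardBalance t)) a = boardBalance t := by
        rw [PySem.Int.bxor_comm a (boardBalance t), pvBxor_assoc, PySem.Int.bxor_self,
          PySem.Int.bxor_zero]
      rw [hself, PySem.Int.bxor_comm]
    | succ n =>
      rw [List.set_cons_succ, pvBal_cons, List.getElem_cons_succ, pvBal_cons,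
        ih n (by simpa using h)]
      simp [pvBxor_assoc]

theorem pvInner_iff (x a : Int) :
    (∃ j, (0 ≤ j ∧ j < a + 1) ∧ (PySem.Int.bxor (PySem.Int.bxor x a) j == 0) = true)
      ↔ (0 ≤ PySem.Int.bxor x a ∧ PySem.Int.bxor x a ≤ a) := by
  constructor
  · rintro ⟨j, hj, hz⟩
    rw [beq_iff_eq, pvBxor_eq_zero_iff] at hz
    rw [hz]
    exact ⟨hj.1, by omega⟩
  · rintro ⟨h0, h1⟩
    refine ⟨PySem.Int.bxor x a, ⟨h0, by omega⟩, ?_⟩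
    rw [beq_iff_eq, pvBxor_eq_zero_iff]

-- ===== VERDICT (by name: the statement is the Claim_ definition above) =====
theorem Solution_spec : Claim_equal_Solution := by
  intro ar _
  unfold Spec_Solution Solution Solution_alt
  have hbb : ar.foldl (fun x v => PySem.Int.bxor x v) 0 = boardBalance ar := rfl
  simp only [hbb]
  by_cases hx : boardBalance ar = 0
  · rw [if_pos (by simpa using hx), if_pos (by simpa using hx)]
  · rw [if_neg (by simpa using hx), if_neg (by simpa using hx)]
    rw [Bool.eq_iff_iff]
    simp only [List.any_eq_true, PySem.List.mem_pyRange_one]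
    constructor
    · rintro ⟨i, ⟨h0, h1⟩, hin⟩
      have hlen : i.toNat < ar.length := by omega
      rw [PySem.List.pyGetD_eq_getElem ar 0 h0 h1] at hin
      simp only [PySem.List.pySetD_of_nonneg ar _ h0] at hin
      simp only [pvBal_set ar i.toNat _ hlen] at hin
      rw [pvInner_iff] at hin
      exact ⟨ar[i.toNat], List.getElem_mem hlen, by simp [hin.1, hin.2]⟩
    · rintro ⟨v, hv, hp⟩
      simp only [Bool.and_eq_true, decide_eq_true_eq] at hp
      obtain ⟨n, hn, rfl⟩ := List.mem_iff_getElem.mp hv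
      have h0 : (0 : Int) ≤ (n : Int) := by positivity
      have h1 : (n : Int) < (ar.length : Int) := by exact_mod_cast hn
      refine ⟨(n : Int), ⟨h0, h1⟩, ?_⟩
      rw [PySem.List.pyGetD_eq_getElem ar 0 h0 h1]
      simp only [PySem.List.pySetD_of_nonneg ar _ h0]
      simp only [Int.toNat_natCast]
      simp only [pvBal_set ar n _ hn]
      rw [pvInner_iff]
      exact hp
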